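-- pv_equiv track=rewrite | github.com/sherwinshen/TAs-learning-site | server/app/automata_learning/black_box/pac_learning/normal_teacher/obsTable.py | guess_resets_in_suffixes
-- ===== SOURCE A (Python) =====
-- from itertools import product
--
-- def guess_resets_in_suffixes(E):
--     # 返回所有可能的情况，举例:
--     # E = [[], [1], [1, 2]]
--     # res = [
--     #     [[], [True], [True, True]],
--     #     [[], [True], [True, False]]
--     # ]
--     resets_list = []
--     for e in E:
--         if not e:
--             resets_list.append([[]])
--         else:
--             if len(e) == 1:
--                 temp_list = [[True]]
--             else:
--                 temp_list = [[True, False]] * (len(e) - 1) + [[True]]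
--             resets_list.append([list(situation) for situation in product(*temp_list)])
--     return [list(resets) for resets in product(*resets_list)]
-- ===== SOURCE B (Python) =====
-- def guess_resets_in_suffixes(E):
--     # Odometer enumeration: instead of materialising per-suffix situation lists and
--     # taking their Cartesian product, keep ONE current combination (all True) and
--     # repeatedly step it to its successor by ripple-carry over the free positions
--     # (rightmost fastest, True counts as 0), collecting states until it wraps.
--
--     def succ_rev(bits):
--         # successor of the free bits of one row, least-significant (rightmost) first
--         if not bits:
--             return None
--         if bits[0]:
--             return [False] + bits[1:]
--         rest = succ_rev(bits[1:])
--         return None if rest is None else [True] + rest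
--
--     def row_succ(row):
--         nxt = succ_rev(list(reversed(row[:-1])))
--         return None if nxt is None else list(reversed(nxt)) + [True]
--
--     def state_succ(state):
--         if not state:
--             return None
--         head, rest = state[0], state[1:]
--         nrest = state_succ(rest)
--         if nrest is not None:
--             return [head] + nrest
--         nhead = row_succ(head)
--         if nhead is None:
--             return None
--         return [nhead] + [[True] * len(r) for r in rest]
--
--     out = []
--     cur = [[True] * len(e) for e in E]
--     while cur is not None:
--         out.append(cur)
--         cur = state_succ(cur)
--     return out
-- ===== Notes on version B (the rewrite author's own statement) =====
-- stated objective: alternative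
-- what changed: Replaces the Cartesian-product enumeration (itertools.product over pre-built per-suffix situation lists) by an odometer: a single current combination (all True) is repeatedly advanced by a ripple-carry successor function over the free reset positions (rightmost fastest, True=0), collecting each state until the odometer wraps; no situation list or product is ever materialised.
import Mathlib
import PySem

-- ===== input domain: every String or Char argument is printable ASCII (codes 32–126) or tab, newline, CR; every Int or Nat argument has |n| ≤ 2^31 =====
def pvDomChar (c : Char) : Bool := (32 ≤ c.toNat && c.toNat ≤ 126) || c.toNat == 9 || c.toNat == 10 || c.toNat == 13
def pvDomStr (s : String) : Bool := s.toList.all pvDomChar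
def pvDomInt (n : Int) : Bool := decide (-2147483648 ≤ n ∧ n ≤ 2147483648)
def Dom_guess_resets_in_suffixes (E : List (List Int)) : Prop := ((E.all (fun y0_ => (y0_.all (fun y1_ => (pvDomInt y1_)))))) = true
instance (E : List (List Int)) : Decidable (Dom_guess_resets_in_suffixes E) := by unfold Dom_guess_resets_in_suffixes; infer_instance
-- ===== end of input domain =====

-- B replaces the Cartesian-product enumeration by an odometer: one current combination is
-- repeatedly advanced by a ripple-carry successor until it wraps (objective: alternative).

-- ===== PORT A =====
-- itertools.product(*ls): leftmost factor varies slowest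
def pyProduct {α : Type} (ls : List (List α)) : List (List α) :=
  match ls with
  | [] => [[]]
  | xs :: rest => xs.flatMap (fun x => (pyProduct rest).map (fun t => x :: t))

def guess_resets_in_suffixes (E : List (List Int)) : List (List (List Bool)) :=
  let resets_list :=
    E.foldl (fun acc e =>
      if e = [] then acc ++ [[([] : List Bool)]]
      else
        let temp_list :=
          if e.length = 1 then [[true]]
          else List.replicate (e.length - 1) [true, false] ++ [[true]]
        -- list(situation) is the identity on lists
        acc ++ [(pyProduct temp_list).map (fun s => s)]) []
  (pyProduct resets_list).map (fun r => r)

-- ===== PORT B =====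
-- successor of one row's free bits, least-significant (rightmost) first
def succRev : List Bool → Option (List Bool)
  | [] => none
  | true :: rest => some (false :: rest)
  | false :: rest => (succRev rest).map (fun l => true :: l)

-- row[:-1] reversed, stepped, reversed back, with the forced trailing True re-attached
def rowSucc (row : List Bool) : Option (List Bool) :=
  match succRev row.dropLast.reverse with
  | none => none
  | some f => some (f.reverse ++ [true])

-- [[True]*len(r) for r in rest]
def pvReset (s : List (List Bool)) : List (List Bool) :=
  s.map (fun r => List.replicate r.length true)

def stateSucc : List (List Bool) → Option (List (List Bool))
  | [] => none
  | r :: rest =>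
    match stateSucc rest with
    | some rest' => some (r :: rest')
    | none =>
      match rowSucc r with
      | none => none
      | some r' => some (r' :: pvReset rest)

-- termination machinery for the main odometer loop (cited by `run`'s decreasing_by)
def pvValL : List Bool → Nat
  | [] => 0
  | b :: l => (if b then 0 else 1) + 2 * pvValL l

def pvRowVal (r : List Bool) : Nat := pvValL r.dropLast.reverse

def pvFB (s : List (List Bool)) : Nat := (s.map (fun r => r.dropLast.length)).sum

def pvVal : List (List Bool) → Nat
  | [] => 0
  | r :: rest => pvRowVal r * 2 ^ pvFB rest + pvVal rest

theorem pvValL_lt (l : List Bool) : pvValL l < 2 ^ l.length := by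
  induction l with
  | nil => simp [pvValL]
  | cons b l ih =>
    simp only [pvValL, List.length_cons, pow_succ]
    cases b <;> simp <;> omega

theorem succRev_some (l l' : List Bool) (h : succRev l = some l') :
    l'.length = l.length ∧ pvValL l' = pvValL l + 1 := by
  induction l generalizing l' with
  | nil => simp [succRev] at h
  | cons b t ih =>
    cases b with
    | true =>
      simp only [succRev, Option.some.injEq] at h
      subst h; simp [pvValL]; omega
    | false =>
      simp only [succRev, Option.map_eq_some_iff] at h
      obtain ⟨t', ht, rfl⟩ := h
      obtain ⟨h1, h2⟩ := ih t' ht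
      simp [pvValL, h1, h2]; omega

theorem succRev_none (l : List Bool) (h : succRev l = none) :
    pvValL l + 1 = 2 ^ l.length := by
  induction l with
  | nil => simp [pvValL]
  | cons b t ih =>
    cases b with
    | true => simp [succRev] at h
    | false =>
      simp only [succRev, Option.map_eq_none_iff] at h
      have h1 := ih h
      have h2 : pvValL (false :: t) = 1 + 2 * pvValL t := by simp [pvValL]
      rw [h2, List.length_cons, pow_succ]
      omega

theorem rowSucc_some (r r' : List Bool) (h : rowSucc r = some r') :
    r'.dropLast.length = r.dropLast.length ∧ pvRowVal r' = pvRowVal r + 1 ∧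
      r'.length = r.dropLast.length + 1 := by
  unfold rowSucc at h
  cases hs : succRev r.dropLast.reverse with
  | none => rw [hs] at h; simp at h
  | some f =>
    rw [hs] at h
    simp only [Option.some.injEq] at h
    subst h
    obtain ⟨h1, h2⟩ := succRev_some _ _ hs
    refine ⟨?_, ?_, ?_⟩
    · simp
      simpa using h1
    · simp [pvRowVal, h2]
    · simp; simpa using h1

theorem rowSucc_none (r : List Bool) (h : rowSucc r = none) :
    pvRowVal r + 1 = 2 ^ r.dropLast.length := by
  unfold rowSucc at h
  cases hs : succRev r.dropLast.reverse with
  | none =>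
    have := succRev_none _ hs
    simpa [pvRowVal] using this
  | some f => rw [hs] at h; simp at h

theorem pvFB_cons (r : List Bool) (s : List (List Bool)) :
    pvFB (r :: s) = r.dropLast.length + pvFB s := by
  simp [pvFB]

theorem pvReset_lengths (s : List (List Bool)) :
    (pvReset s).map (fun r => r.length) = s.map (fun r => r.length) := by
  simp [pvReset, List.map_map, Function.comp]

theorem pvFB_eq_of_lengths (s t : List (List Bool))
    (h : s.map (fun r => r.length) = t.map (fun r => r.length)) : pvFB s = pvFB t := by
  unfold pvFB
  have : s.map (fun r => r.dropLast.length) = t.map (fun r => r.dropLast.length) := by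
    have hs : s.map (fun r => r.dropLast.length) = (s.map (fun r => r.length)).map (fun n => n - 1) := by
      simp [List.map_map, Function.comp, List.length_dropLast]
    have ht : t.map (fun r => r.dropLast.length) = (t.map (fun r => r.length)).map (fun n => n - 1) := by
      simp [List.map_map, Function.comp, List.length_dropLast]
    rw [hs, ht, h]
  rw [this]

theorem pvVal_reset (s : List (List Bool)) : pvVal (pvReset s) = 0 := by
  induction s with
  | nil => rfl
  | cons r t ih =>
    simp only [pvReset, List.map_cons, pvVal] at *
    have hrow : pvRowVal (List.replicate r.length true) = 0 := by
      have hall : ∀ m, pvValL (List.replicate m true) = 0 := by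
        intro m; induction m with
        | zero => rfl
        | succ m ih => simp [List.replicate_succ, pvValL, ih]
      have hdl : (List.replicate r.length true).dropLast.reverse
          = List.replicate (r.length - 1) true := by
        rw [List.dropLast_replicate, List.reverse_replicate]
      rw [pvRowVal, hdl, hall]
    simp [hrow, ih]

theorem pvVal_lt (s : List (List Bool)) : pvVal s < 2 ^ pvFB s := by
  induction s with
  | nil => simp [pvVal, pvFB]
  | cons r t ih =>
    simp only [pvVal, pvFB_cons, pow_add]
    have h1 : pvRowVal r < 2 ^ r.dropLast.length := by
      have := pvValL_lt r.dropLast.reverse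
      simpa [pvRowVal] using this
    calc pvRowVal r * 2 ^ pvFB t + pvVal t
        < pvRowVal r * 2 ^ pvFB t + 2 ^ pvFB t := by omega
      _ = (pvRowVal r + 1) * 2 ^ pvFB t := by ring
      _ ≤ 2 ^ r.dropLast.length * 2 ^ pvFB t := by
          exact Nat.mul_le_mul_right _ (by omega)

theorem stateSucc_none_val (s : List (List Bool)) (h : stateSucc s = none) :
    pvVal s + 1 = 2 ^ pvFB s := by
  induction s with
  | nil => simp [pvVal, pvFB]
  | cons r t ih =>
    simp only [stateSucc] at h
    cases hs : stateSucc t with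
    | some t' => rw [hs] at h; simp at h
    | none =>
      rw [hs] at h
      cases hr : rowSucc r with
      | some r' => rw [hr] at h; simp at h
      | none =>
        have h1 := ih hs
        have h2 := rowSucc_none r hr
        simp only [pvVal, pvFB_cons, pow_add]
        have : (pvRowVal r + 1) * 2 ^ pvFB t = 2 ^ r.dropLast.length * 2 ^ pvFB t := by
          rw [h2]
        nlinarith [this]

theorem stateSucc_some (s s' : List (List Bool)) (h : stateSucc s = some s') :
    s'.map (fun r => r.length) = s.map (fun r => r.length) ∧ pvVal s' = pvVal s + 1 := by
  induction s generalizing s' with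
  | nil => simp [stateSucc] at h
  | cons r t ih =>
    simp only [stateSucc] at h
    cases hs : stateSucc t with
    | some t' =>
      rw [hs] at h
      simp only [Option.some.injEq] at h
      subst h
      obtain ⟨hlen, hval⟩ := ih t' hs
      constructor
      · simp [hlen]
      · simp only [pvVal]
        rw [pvFB_eq_of_lengths t' t hlen, hval]
        omega
    | none =>
      rw [hs] at h
      cases hr : rowSucc r with
      | none => rw [hr] at h; simp at h
      | some r' =>
        rw [hr] at h
        simp only [Option.some.injEq] at h
        subst h
        obtain ⟨hd, hv, hl⟩ := rowSucc_some r r' hr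
        have hmax := stateSucc_none_val t hs
        have hres := pvReset_lengths t
        have hfb := pvFB_eq_of_lengths (pvReset t) t hres
        constructor
        · simp only [List.map_cons, hres]
          congr 1
          rw [hl]
          cases hcr : r with
          | nil =>
            subst hcr
            exfalso
            simp [rowSucc, succRev] at hr
          | cons a t' => subst hcr; simp

        · simp only [pvVal, hfb, pvVal_reset, hv]
          have : (pvRowVal r + 1) * 2 ^ pvFB t = pvRowVal r * 2 ^ pvFB t + 2 ^ pvFB t := by ring
          omega

theorem stateSucc_measure (s s' : List (List Bool)) (h : stateSucc s = some s') :
    2 ^ pvFB s' - pvVal s' < 2 ^ pvFB s - pvVal s := by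
  obtain ⟨hlen, hval⟩ := stateSucc_some s s' h
  have hfb := pvFB_eq_of_lengths s' s hlen
  have hb := pvVal_lt s'
  rw [hfb] at hb ⊢
  omega

-- the main odometer loop: collect the current state, then step, until the odometer wraps
def run (s : List (List Bool)) : List (List (List Bool)) :=
  match h : stateSucc s with
  | none => [s]
  | some s' => s :: run s'
termination_by 2 ^ pvFB s - pvVal s
decreasing_by exact stateSucc_measure s s' h

def guess_resets_in_suffixes_alt (E : List (List Int)) : List (List (List Bool)) :=
  run (E.map (fun e => List.replicate e.length true))

-- ===== PRECONDITION & SPEC =====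
def Spec_guess_resets_in_suffixes (E : List (List Int)) (out : List (List (List Bool))) : Prop := out = guess_resets_in_suffixes_alt E
instance (E : List (List Int)) (out : List (List (List Bool))) : Decidable (Spec_guess_resets_in_suffixes E out) := by unfold Spec_guess_resets_in_suffixes; infer_instance

-- ===== CLAIM (what is proved, stated in full; the proofs are below) =====
def Claim_equal_guess_resets_in_suffixes : Prop := ∀ (E : List (List Int)), Dom_guess_resets_in_suffixes E → Spec_guess_resets_in_suffixes E (guess_resets_in_suffixes E)

-- ===== LEMMAS AND PROOFS =====

-- proof-only decode: the free bits of counter k, least-significant first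
def pvBits : Nat → Nat → List Bool
  | 0, _ => []
  | m + 1, k => decide (k % 2 = 0) :: pvBits m (k / 2)

def pvRowOf (m k : Nat) : List Bool := (pvBits m k).reverse ++ [true]

def pvSitsOf (e : List Int) : List (List Bool) :=
  if e = [] then [[]] else (List.range (2 ^ (e.length - 1))).map (pvRowOf (e.length - 1))

theorem pvBits_low (m : Nat) : ∀ k, k < 2 ^ m → pvBits (m + 1) k = pvBits m k ++ [true] := by
  induction m with
  | zero =>
    intro k hk
    interval_cases k
    simp [pvBits]
  | succ m ih =>
    intro k hk
    have hq : k / 2 < 2 ^ m := by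
      have : (2:Nat) ^ (m+1) = 2 ^ m * 2 := by rw [pow_succ]
      omega
    rw [pvBits, ih (k / 2) hq, pvBits]
    rfl

theorem pvBits_high (m : Nat) : ∀ k, k < 2 ^ m → pvBits (m + 1) (2 ^ m + k) = pvBits m k ++ [false] := by
  induction m with
  | zero =>
    intro k hk
    interval_cases k
    simp [pvBits]
  | succ m ih =>
    intro k hk
    have h2 : (2:Nat) ^ (m+1) = 2 * 2 ^ m := by rw [pow_succ]; ring
    have hmod : (2 ^ (m+1) + k) % 2 = k % 2 := by
      rw [h2, Nat.mul_add_mod]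
    have hdiv : (2 ^ (m+1) + k) / 2 = 2 ^ m + k / 2 := by
      rw [h2, Nat.mul_add_div (by norm_num)]
    have hq : k / 2 < 2 ^ m := by omega
    rw [pvBits, hmod, hdiv, ih (k / 2) hq, pvBits]
    rfl

theorem pyProduct_replicate (m : Nat) :
    pyProduct (List.replicate m [true, false] ++ [[true]]) = (List.range (2 ^ m)).map (pvRowOf m) := by
  induction m with
  | zero => rfl
  | succ m ih =>
    rw [List.replicate_succ, List.cons_append]
    simp only [pyProduct, ih]
    have hsplit : (2:Nat) ^ (m + 1) = 2 ^ m + 2 ^ m := by rw [pow_succ]; ring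
    rw [hsplit, List.range_add, List.map_append, List.map_map]
    simp only [List.flatMap_cons, List.flatMap_nil, List.append_nil, List.map_map]
    congr 1
    · apply List.map_congr_left
      intro k hk
      rw [List.mem_range] at hk
      simp only [Function.comp_apply, pvRowOf, pvBits_low m k hk, List.reverse_append]
      rfl
    · apply List.map_congr_left
      intro k hk
      rw [List.mem_range] at hk
      simp only [Function.comp_apply, pvRowOf, pvBits_high m k hk, List.reverse_append]
      rfl

theorem pvSitsOf_eq (e : List Int) :
    pvSitsOf e = if e = [] then [([] : List Bool)]
      else (pyProduct (if e.length = 1 then [[true]]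
        else List.replicate (e.length - 1) [true, false] ++ [[true]])).map (fun s => s) := by
  unfold pvSitsOf
  by_cases h : e = []
  · simp [h]
  · rw [if_neg h, if_neg h, List.map_id']
    by_cases h1 : e.length = 1
    · rw [if_pos h1, h1]
      have h2 : ([[true]] : List (List Bool)) = List.replicate 0 [true, false] ++ [[true]] := rfl
      rw [h2, pyProduct_replicate]
    · rw [if_neg h1, pyProduct_replicate]

theorem A_eq_product (E : List (List Int)) :
    guess_resets_in_suffixes E = pyProduct (E.map pvSitsOf) := by
  unfold guess_resets_in_suffixes
  have hfun : (fun (acc : List (List (List Bool))) e =>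
      if e = [] then acc ++ [[([] : List Bool)]]
      else acc ++ [(pyProduct (if e.length = 1 then [[true]]
        else List.replicate (e.length - 1) [true, false] ++ [[true]])).map (fun s => s)])
      = fun acc e => acc ++ [pvSitsOf e] := by
    funext acc e
    rw [pvSitsOf_eq]
    by_cases h : e = [] <;> simp [h]
  simp only [hfun, PySem.List.foldl_append_singleton_eq_map, List.nil_append]
  simp

-- unfolding equations for run
theorem run_none {s : List (List Bool)} (h : stateSucc s = none) : run s = [s] := by
  rw [run]
  split <;> simp_all

theorem run_some {s s' : List (List Bool)} (h : stateSucc s = some s') : run s = s :: run s' := by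
  rw [run]
  split <;> simp_all

-- carry structure of the odometer on a cons state
theorem run_cons (s : List (List Bool)) : ∀ r, run (r :: s) =
    (run s).map (fun t => r :: t) ++
      (match rowSucc r with
       | none => []
       | some r' => run (r' :: pvReset s)) := by
  induction s using run.induct with
  | case1 s h =>
    intro r
    rw [run_none h]
    cases hr : rowSucc r with
    | none =>
      have : stateSucc (r :: s) = none := by simp [stateSucc, h, hr]
      rw [run_none this]
      simp
    | some r' =>
      have : stateSucc (r :: s) = some (r' :: pvReset s) := by simp [stateSucc, h, hr]
      rw [run_some this]
      simp
  | case2 s s' h ih =>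
    intro r
    have hstep : stateSucc (r :: s) = some (r :: s') := by simp [stateSucc, h]
    rw [run_some hstep, ih r, run_some h]
    have hres : pvReset s' = pvReset s := by
      obtain ⟨hlen, _⟩ := stateSucc_some s s' h
      unfold pvReset
      have hs' : s'.map (fun r => List.replicate r.length true)
          = (s'.map (fun r => r.length)).map (fun n => List.replicate n true) := by
        simp [List.map_map, Function.comp]
      have hs : s.map (fun r => List.replicate r.length true)
          = (s.map (fun r => r.length)).map (fun n => List.replicate n true) := by
        simp [List.map_map, Function.comp]
      rw [hs', hs, hlen]
    rw [hres]
    simp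

theorem run_cons_none (s : List (List Bool)) (r : List Bool) (h : rowSucc r = none) :
    run (r :: s) = (run s).map (fun t => r :: t) := by
  rw [run_cons s r, h]
  simp

theorem run_cons_some (s : List (List Bool)) (r r' : List Bool) (h : rowSucc r = some r') :
    run (r :: s) = (run s).map (fun t => r :: t) ++ run (r' :: pvReset s) := by
  rw [run_cons s r, h]

theorem rowSucc_rowOf (m k : Nat) (hk : k < 2 ^ m) :
    rowSucc (pvRowOf m k) = if k + 1 < 2 ^ m then some (pvRowOf m (k + 1)) else none := by
  have hbits : ∀ m k, k < 2 ^ m →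
      succRev (pvBits m k) = if k + 1 < 2 ^ m then some (pvBits m (k + 1)) else none := by
    intro m
    induction m with
    | zero =>
      intro k hk
      interval_cases k
      simp [pvBits, succRev]
    | succ m ih =>
      intro k hk
      have h2 : (2:Nat) ^ (m+1) = 2 * 2 ^ m := by rw [pow_succ]; ring
      by_cases hp : k % 2 = 0
      · have hb : decide (k % 2 = 0) = true := by simp [hp]
        simp only [pvBits, hb, succRev]
        have hlt : k + 1 < 2 ^ (m + 1) := by omega
        rw [if_pos hlt]
        have hmod : (k + 1) % 2 = 1 := by omega
        have hdiv : (k + 1) / 2 = k / 2 := by omega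
        simp [hmod, hdiv]
      · have hb : decide (k % 2 = 0) = false := by simp [hp]
        simp only [pvBits, hb, succRev]
        have hq : k / 2 < 2 ^ m := by omega
        rw [ih (k / 2) hq]
        by_cases hlt : k / 2 + 1 < 2 ^ m
        · rw [if_pos hlt]
          have hlt' : k + 1 < 2 ^ (m + 1) := by omega
          rw [if_pos hlt']
          have hmod : (k + 1) % 2 = 0 := by omega
          have hdiv : (k + 1) / 2 = k / 2 + 1 := by omega
          simp [hmod, hdiv]
        · rw [if_neg hlt]
          have hlt' : ¬ (k + 1 < 2 ^ (m + 1)) := by omega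
          rw [if_neg hlt']
          rfl
  unfold rowSucc pvRowOf
  rw [List.dropLast_concat, List.reverse_reverse, hbits m k hk]
  by_cases hlt : k + 1 < 2 ^ m
  · rw [if_pos hlt, if_pos hlt]
  · rw [if_neg hlt, if_neg hlt]

theorem rowSucc_nil : rowSucc ([] : List Bool) = none := rfl

-- one full row sweep: run over (rowOf m k :: s) with s self-resetting
theorem run_row_block (m : Nat) : ∀ (j k : Nat), 0 < j → k + j = 2 ^ m →
    ∀ s, pvReset s = s →
    run (pvRowOf m k :: s) =
      ((List.range' k j).map (pvRowOf m)).flatMap (fun r => (run s).map (fun t => r :: t)) := by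
  intro j
  induction j with
  | zero => intro k h0 _ _ _; omega
  | succ j ih =>
    intro k _ hk s hs
    have hklt : k < 2 ^ m := by omega
    by_cases hlt : k + 1 < 2 ^ m
    · have hrs : rowSucc (pvRowOf m k) = some (pvRowOf m (k + 1)) := by
        rw [rowSucc_rowOf m k hklt, if_pos hlt]
      have hj : 0 < j := by omega
      rw [run_cons_some s _ _ hrs, hs, ih (k + 1) hj (by omega) s hs]
      rw [List.range'_succ, List.map_cons, List.flatMap_cons]
    · have hrs : rowSucc (pvRowOf m k) = none := by
        rw [rowSucc_rowOf m k hklt, if_neg hlt]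
      have hj : j = 0 := by omega
      subst hj
      rw [run_cons_none s _ hrs]
      simp [List.range'_succ]

theorem pvReset_init (E : List (List Int)) :
    pvReset (E.map (fun e => List.replicate e.length true)) = E.map (fun e => List.replicate e.length true) := by
  simp [pvReset, List.map_map, Function.comp]

theorem pvBits_zeroK (m : Nat) : pvBits m 0 = List.replicate m true := by
  induction m with
  | zero => rfl
  | succ m ih => simp [pvBits, ih, List.replicate_succ]

theorem pvRowOf_zero (m : Nat) : pvRowOf m 0 = List.replicate (m + 1) true := by
  rw [pvRowOf, pvBits_zeroK, List.reverse_replicate, List.replicate_succ']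

theorem run_init (E : List (List Int)) :
    run (E.map (fun e => List.replicate e.length true)) = pyProduct (E.map pvSitsOf) := by
  induction E with
  | nil =>
    rw [List.map_nil, run_none rfl]
    rfl
  | cons e E ih =>
    rw [List.map_cons, List.map_cons]
    by_cases he : e = []
    · subst he
      simp only [List.length_nil, List.replicate_zero]
      rw [run_cons_none _ _ rowSucc_nil, ih]
      simp [pvSitsOf, pyProduct]
    · have hlen : e.length - 1 + 1 = e.length := by
        have : e.length ≠ 0 := by simpa using he
        omega
      have hinit : List.replicate e.length true = pvRowOf (e.length - 1) 0 := by
        rw [pvRowOf_zero, hlen]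
      rw [hinit, run_row_block (e.length - 1) (2 ^ (e.length - 1)) 0
            (Nat.two_pow_pos _) (by omega) _ (pvReset_init E), ih]
      have hsits : pvSitsOf e = (List.range (2 ^ (e.length - 1))).map (pvRowOf (e.length - 1)) := by
        rw [pvSitsOf, if_neg he]
      rw [hsits]
      simp only [pyProduct]
      rw [List.range_eq_range']

-- ===== VERDICT (by name: the statement is the Claim_ definition above) =====
theorem guess_resets_in_suffixes_spec : Claim_equal_guess_resets_in_suffixes := by
  intro E _
  unfold Spec_guess_resets_in_suffixes guess_resets_in_suffixes_alt
  rw [A_eq_product, run_init]
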